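-- pv_equiv track=rewrite | github.com/Tol-D/BYTEEYE | Code/Core/Training/Features_Extract.py | rule_access
-- ===== SOURCE A (Python) =====
-- def rule_access(block,edges):
--     judge1 = False
--     judge2 = False
--     ra=0
--     for t in block['bytecode'].split('\''):
--         if t=='33':#CALLER
--             judge1=True
--             continue
--         if judge1 and t=='14':#EQ
--             judge2=True
--             continue
--         if judge1 and judge2 and t=='fd':#REVERT
--             ra=1
--         if judge1 and judge2 and t=='57':#JUMPI
--             ra=1
--     return ra
-- ===== SOURCE B (Python) =====
-- def rule_access(block, edges):
--     tokens = block['bytecode'].split('\'')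
--     try:
--         i = tokens.index('33')
--         j = tokens.index('14', i + 1)
--     except ValueError:
--         return 0
--     return 1 if any(t in ('fd', '57') for t in tokens[j + 1:]) else 0
-- ===== Notes on version B (the rewrite author's own statement) =====
-- stated objective: alternative
-- what changed: Replaces the flag-driven state machine (judge1/judge2 booleans threaded through one loop) with phased index-based searches: locate the first '33', the first '14' after it via list.index with a start, then scan only the tail for 'fd'/'57'.
import Mathlib
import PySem

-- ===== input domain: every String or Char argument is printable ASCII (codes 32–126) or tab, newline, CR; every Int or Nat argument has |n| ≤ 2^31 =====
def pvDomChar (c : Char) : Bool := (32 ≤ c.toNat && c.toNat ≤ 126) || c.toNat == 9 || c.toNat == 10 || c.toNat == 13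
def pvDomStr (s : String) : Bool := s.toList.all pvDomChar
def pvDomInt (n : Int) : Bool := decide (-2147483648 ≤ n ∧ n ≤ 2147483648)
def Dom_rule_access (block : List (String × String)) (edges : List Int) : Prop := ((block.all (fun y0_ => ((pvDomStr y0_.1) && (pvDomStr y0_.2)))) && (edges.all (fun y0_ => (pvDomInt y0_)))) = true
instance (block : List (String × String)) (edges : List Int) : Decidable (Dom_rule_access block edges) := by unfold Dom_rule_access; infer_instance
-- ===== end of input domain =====

-- B replaces A's flag-driven single-pass state machine by phased index searches
-- (first '33', first '14' after it, then a tail scan for 'fd'/'57'); return value only.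

-- ===== PORT A =====
-- A's loop: state (judge1, judge2, ra), branches in source order.
def ruleALoop : List String → Bool → Bool → Int → Int
  | [], _, _, ra => ra
  | t :: ts, j1, j2, ra =>
    if t = "33" then ruleALoop ts true j2 ra
    else if j1 && t = "14" then ruleALoop ts j1 true ra
    else
      let ra1 := if j1 && j2 && t = "fd" then 1 else ra
      let ra2 := if j1 && j2 && t = "57" then 1 else ra1
      ruleALoop ts j1 j2 ra2

def rule_access (block : List (String × String)) (edges : List Int) : Int :=
  match (PySem.Dict.mk block).get? "bytecode" with
  | none => 0  -- KeyError in Python: excluded by Pre_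
  | some bc => ruleALoop ((PySem.Str.split? bc "'").getD []) false false 0

-- ===== PORT B =====
def rule_access_alt (block : List (String × String)) (edges : List Int) : Int :=
  match (PySem.Dict.mk block).get? "bytecode" with
  | none => 0  -- KeyError in Python: excluded by Pre_
  | some bc =>
    let tokens := (PySem.Str.split? bc "'").getD []
    match PySem.List.index? tokens "33" with
    | none => 0
    | some i =>
      -- tokens.index('14', i+1): index? of the dropped prefix, offset by i+1 (exact hand port)
      match PySem.List.index? (tokens.drop (i + 1)) "14" with
      | none => 0
      | some k =>
        let j := i + 1 + k
        if (tokens.drop (j + 1)).any (fun t => t == "fd" || t == "57") then 1 else 0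

-- ===== PRECONDITION & SPEC =====
-- Pre_ excludes exactly the inputs where block['bytecode'] raises KeyError in Python.
def Pre_rule_access (block : List (String × String)) (edges : List Int) : Prop :=
  ((PySem.Dict.mk block).get? "bytecode").isSome = true
instance (block : List (String × String)) (edges : List Int) : Decidable (Pre_rule_access block edges) := by unfold Pre_rule_access; infer_instance
def pvWitness_rule_access : (List (String × String)) × List Int := ([("bytecode", "33'14'fd")], [])

def Spec_rule_access (block : List (String × String)) (edges : List Int) (out : Int) : Prop := out = rule_access_alt block edges
instance (block : List (String × String)) (edges : List Int) (out : Int) : Decidable (Spec_rule_access block edges out) := by unfold Spec_rule_access; infer_instance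

-- ===== CLAIM (what is proved, stated in full; the proofs are below) =====
def Claim_equal_rule_access : Prop := ∀ (block : List (String × String)) (edges : List Int), Dom_rule_access block edges → Pre_rule_access block edges → Spec_rule_access block edges (rule_access block edges)

-- ===== LEMMAS AND PROOFS =====

lemma ruleALoop_one : ∀ (ts : List String) (j1 j2 : Bool), ruleALoop ts j1 j2 1 = 1 := by
  intro ts
  induction ts with
  | nil => intro j1 j2; rfl
  | cons t ts ih =>
    intro j1 j2
    simp only [ruleALoop]
    split_ifs <;> simp [ih]

lemma ruleALoop_tt : ∀ (ts : List String),
    ruleALoop ts true true 0 = if ts.any (fun t => t == "fd" || t == "57") then 1 else 0 := by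
  intro ts
  induction ts with
  | nil => rfl
  | cons t ts ih =>
    simp only [ruleALoop, List.any_cons]
    by_cases h33 : t = "33"
    · subst h33; simp [ih]
    · by_cases h14 : t = "14"
      · subst h14; simp [ih]
      · by_cases hfd : t = "fd"
        · subst hfd; simp [ruleALoop_one]
        · by_cases h57 : t = "57"
          · subst h57; simp [ruleALoop_one]
          · simp [h33, h14, hfd, h57, ih]

lemma ruleALoop_tf : ∀ (ts : List String),
    ruleALoop ts true false 0 =
      match PySem.List.index? ts "14" with
      | none => 0
      | some k => if (ts.drop (k + 1)).any (fun t => t == "fd" || t == "57") then 1 else 0 := by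
  intro ts
  induction ts with
  | nil => rfl
  | cons t ts ih =>
    by_cases h14 : t = "14"
    · subst h14
      rw [PySem.List.index?_cons_self]
      have hL : ruleALoop ("14" :: ts) true false 0 = ruleALoop ts true true 0 := by
        simp [ruleALoop]
      rw [hL, ruleALoop_tt]
      rfl
    · rw [PySem.List.index?_cons_of_ne ts h14]
      by_cases h33 : t = "33"
      · subst h33
        have hL : ruleALoop ("33" :: ts) true false 0 = ruleALoop ts true false 0 := by
          simp [ruleALoop]
        rw [hL, ih]
        cases PySem.List.index? ts "14" <;> simp
      · have hL : ruleALoop (t :: ts) true false 0 = ruleALoop ts true false 0 := by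
          simp [ruleALoop, h33, h14]
        rw [hL, ih]
        cases PySem.List.index? ts "14" <;> simp

lemma ruleALoop_ff : ∀ (ts : List String),
    ruleALoop ts false false 0 =
      match PySem.List.index? ts "33" with
      | none => 0
      | some i =>
        match PySem.List.index? (ts.drop (i + 1)) "14" with
        | none => 0
        | some k => if (ts.drop (i + 1 + k + 1)).any (fun t => t == "fd" || t == "57") then 1 else 0 := by
  intro ts
  induction ts with
  | nil => rfl
  | cons t ts ih =>
    by_cases h33 : t = "33"
    · subst h33
      rw [PySem.List.index?_cons_self]
      simp only [ruleALoop]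
      rw [ruleALoop_tf ts]
      simp only [List.drop_succ_cons, List.drop_zero, Nat.zero_add]
      cases h : PySem.List.index? ts "14" with
      | none => rfl
      | some k => simp [Nat.add_comm]
    · rw [PySem.List.index?_cons_of_ne ts h33]
      simp only [ruleALoop, if_neg h33]
      simp only [Bool.false_and, Bool.false_eq_true, if_false, ih]
      cases h : PySem.List.index? ts "33" with
      | none => rfl
      | some i =>
        simp only [Option.map_some]
        have hdrop : (t :: ts).drop (i + 1 + 1) = ts.drop (i + 1) := by
          simp [List.drop_succ_cons]
        rw [hdrop]
        cases PySem.List.index? (ts.drop (i + 1)) "14" with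
        | none => rfl
        | some k =>
          have h2 : i + 1 + 1 + k + 1 = (i + 1 + k + 1) + 1 := by omega
          simp only [h2, List.drop_succ_cons]

-- ===== VERDICT (by name: the statement is the Claim_ definition above) =====
theorem rule_access_spec : Claim_equal_rule_access := by
  intro block edges _ _
  unfold Spec_rule_access rule_access rule_access_alt
  cases h : (PySem.Dict.mk block).get? "bytecode" with
  | none => rfl
  | some bc => simp only [ruleALoop_ff]
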